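-- pv_equiv track=rewrite | github.com/KimHS0915/programmers-learn-challenges | lv1/mock_exam.py | solution
-- ===== SOURCE A (Python) =====
-- def solution(answers):
--     return_answer = []
--     p1 = [1, 2, 3, 4, 5]
--     p2 = [2, 1, 2, 3, 2, 4, 2, 5]
--     p3 = [3, 3, 1, 1, 2, 2, 4, 4, 5, 5]
--     scores = [0, 0, 0]
--     for i in range(len(answers)):
--         if answers[i] == p1[i%len(p1)]:
--             scores[0] += 1
--         if answers[i] == p2[i%len(p2)]:
--             scores[1] += 1
--         if answers[i] == p3[i%len(p3)]:
--             scores[2] += 1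
--     for idx, score in enumerate(scores):
--         if score == max(scores):
--             return_answer.append(idx + 1)
--     return return_answer
-- ===== SOURCE B (Python) =====
-- def _score(answers, p):
--     s = 0
--     rest = p
--     for a in answers:
--         if not rest:
--             rest = p
--         s += a == rest[0]
--         rest = rest[1:]
--     return s
--
--
-- def solution(answers):
--     patterns = [[1, 2, 3, 4, 5],
--                 [2, 1, 2, 3, 2, 4, 2, 5],
--                 [3, 3, 1, 1, 2, 2, 4, 4, 5, 5]]
--     scores = [_score(answers, p) for p in patterns]
--     m = max(scores)
--     return [i + 1 for i, s in enumerate(scores) if s == m]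
-- ===== Notes on version B (the rewrite author's own statement) =====
-- stated objective: idiomatic
-- what changed: A's single answer-indexed loop scoring all three patterns at once via i % len(p) modular indexing is replaced by three independent per-pattern passes that rotate the pattern list itself (no index arithmetic), followed by one max computed once instead of inside the selection loop.
import Mathlib
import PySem

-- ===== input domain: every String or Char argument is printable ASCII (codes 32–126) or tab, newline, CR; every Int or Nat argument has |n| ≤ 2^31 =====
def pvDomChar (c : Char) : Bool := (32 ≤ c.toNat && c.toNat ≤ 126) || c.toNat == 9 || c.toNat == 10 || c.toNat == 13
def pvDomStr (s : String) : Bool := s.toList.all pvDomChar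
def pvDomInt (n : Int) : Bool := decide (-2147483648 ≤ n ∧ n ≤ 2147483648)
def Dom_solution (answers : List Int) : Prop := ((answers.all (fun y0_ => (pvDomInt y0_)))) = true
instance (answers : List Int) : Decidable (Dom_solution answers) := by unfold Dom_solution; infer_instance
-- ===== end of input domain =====

-- B re-decomposes A's single modulo-indexed loop into three independent per-pattern
-- passes that rotate the pattern list itself (no index arithmetic), then selects the
-- top scorers once; objective: idiomatic/alternative, not faster.

-- ===== PORT A =====
-- one pass over indices i, comparing answers[i] with p_k[i % len(p_k)] for the three
-- patterns at once; indices are always in range, so pyGetD's default 0 is never used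
def solution (answers : List Int) : List Int :=
  let p1 : List Int := [1, 2, 3, 4, 5]
  let p2 : List Int := [2, 1, 2, 3, 2, 4, 2, 5]
  let p3 : List Int := [3, 3, 1, 1, 2, 2, 4, 4, 5, 5]
  let scores :=
    (PySem.List.pyRange 0 (answers.length : Int) 1).foldl
      (fun (s : Int × Int × Int) i =>
        let a := PySem.List.pyGetD answers i 0
        ((if a = PySem.List.pyGetD p1 (PySem.Int.mod i 5) 0 then s.1 + 1 else s.1),
         (if a = PySem.List.pyGetD p2 (PySem.Int.mod i 8) 0 then s.2.1 + 1 else s.2.1),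
         (if a = PySem.List.pyGetD p3 (PySem.Int.mod i 10) 0 then s.2.2 + 1 else s.2.2)))
      (0, 0, 0)
  let lst : List Int := [scores.1, scores.2.1, scores.2.2]
  (PySem.List.enumerate lst 0).foldl
    (fun acc pr => if pr.2 = ((PySem.List.max? lst id).getD 0) then acc ++ [pr.1 + 1] else acc) []

-- ===== PORT B =====
-- _score: walk the answers once, rotating a suffix of the pattern; the pattern is
-- nonempty, so after the reset `rest` is nonempty and headD's default 0 is never used
def bScore (p : List Int) : List Int → Int → List Int → Int
  | [], s, _ => s
  | a :: xs, s, rest =>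
    let rest := if rest.isEmpty then p else rest
    bScore p xs (s + (if a = rest.headD 0 then 1 else 0)) rest.tail

def solution_alt (answers : List Int) : List Int :=
  let patterns : List (List Int) :=
    [[1, 2, 3, 4, 5], [2, 1, 2, 3, 2, 4, 2, 5], [3, 3, 1, 1, 2, 2, 4, 4, 5, 5]]
  let scores := patterns.map (fun p => bScore p answers 0 p)
  let m := ((PySem.List.max? scores id).getD 0)
  (PySem.List.enumerate scores 0).filterMap
    (fun pr => if pr.2 = m then some (pr.1 + 1) else none)

-- ===== PRECONDITION & SPEC =====
def Spec_solution (answers : List Int) (out : List Int) : Prop := out = solution_alt answers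
instance (answers : List Int) (out : List Int) : Decidable (Spec_solution answers out) := by unfold Spec_solution; infer_instance

-- ===== CLAIM (what is proved, stated in full; the proofs are below) =====
def Claim_equal_solution : Prop := ∀ (answers : List Int), Dom_solution answers → Spec_solution answers (solution answers)

-- ===== LEMMAS AND PROOFS =====

-- reference count: matches of xs against pattern p starting at offset k
def cnt (p : List Int) : List Int → Nat → Int
  | [], _ => 0
  | a :: xs, k => (if a = p.getD k 0 then 1 else 0) + cnt p xs ((k + 1) % p.length)

theorem lemB (p : List Int) (hp : p ≠ []) :
    ∀ (xs : List Int) (k : Nat) (cur : List Int) (s : Int),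
      k < p.length → (if cur.isEmpty then p else cur) = p.drop k →
      bScore p xs s cur = s + cnt p xs k := by
  intro xs
  induction xs with
  | nil => intro k cur s _ _; simp [bScore, cnt]
  | cons a xs ih =>
    intro k cur s hk hcur
    have hL : 0 < p.length := List.length_pos_of_ne_nil hp
    have hhead : (if cur.isEmpty then p else cur).headD 0 = p.getD k 0 := by
      rw [hcur]
      rw [List.drop_eq_getElem_cons hk]
      simp [List.getD, List.getElem?_eq_getElem hk]
    have htail : (if cur.isEmpty then p else cur).tail = p.drop (k + 1) := by
      rw [hcur, List.tail_drop]
    have step : bScore p (a :: xs) s cur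
        = bScore p xs (s + (if a = p.getD k 0 then 1 else 0)) (p.drop (k + 1)) := by
      simp only [bScore, hhead, htail]
    rw [step]
    have hk' : (k + 1) % p.length < p.length := Nat.mod_lt _ hL
    have hcur' : (if (p.drop (k + 1)).isEmpty then p else p.drop (k + 1))
        = p.drop ((k + 1) % p.length) := by
      by_cases h : k + 1 < p.length
      · have : ¬ (p.drop (k + 1)).isEmpty := by
          simp [List.isEmpty_iff, List.drop_eq_nil_iff]; omega
        simp [this, Nat.mod_eq_of_lt h]
      · have heq : k + 1 = p.length := by omega
        simp [heq, List.drop_length]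
    rw [ih _ _ _ hk' hcur']
    simp [cnt]
    ring
  
theorem selLemma (M : Int) :
    ∀ (l : List (Int × Int)) (acc : List Int),
      l.foldl (fun acc pr => if pr.2 = M then acc ++ [pr.1 + 1] else acc) acc
        = acc ++ l.filterMap (fun pr => if pr.2 = M then some (pr.1 + 1) else none) := by
  intro l
  induction l with
  | nil => intro acc; simp
  | cons x xs ih =>
    intro acc
    by_cases h : x.2 = M <;> simp [List.foldl_cons, h, ih]

-- A's interleaved fold computes the three reference counts at once
theorem lemA :
    ∀ (xs : List Int) (s : Nat) (a1 a2 a3 : Int),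
      (PySem.List.enumerate xs (s : Int)).foldl
        (fun (st : Int × Int × Int) pr =>
          ((if pr.2 = PySem.List.pyGetD ([1,2,3,4,5] : List Int) (PySem.Int.mod pr.1 5) 0 then st.1 + 1 else st.1),
           (if pr.2 = PySem.List.pyGetD ([2,1,2,3,2,4,2,5] : List Int) (PySem.Int.mod pr.1 8) 0 then st.2.1 + 1 else st.2.1),
           (if pr.2 = PySem.List.pyGetD ([3,3,1,1,2,2,4,4,5,5] : List Int) (PySem.Int.mod pr.1 10) 0 then st.2.2 + 1 else st.2.2)))
        (a1, a2, a3)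
      = (a1 + cnt [1,2,3,4,5] xs (s % 5),
         a2 + cnt [2,1,2,3,2,4,2,5] xs (s % 8),
         a3 + cnt [3,3,1,1,2,2,4,4,5,5] xs (s % 10)) := by
  intro xs
  induction xs with
  | nil => intro s a1 a2 a3; simp [PySem.List.enumerate, cnt]
  | cons a xs ih =>
    intro s a1 a2 a3
    have h5 : PySem.Int.mod (s : Int) 5 = ((s % 5 : Nat) : Int) := by
      exact_mod_cast PySem.Int.mod_natCast s 5
    have h8 : PySem.Int.mod (s : Int) 8 = ((s % 8 : Nat) : Int) := by
      exact_mod_cast PySem.Int.mod_natCast s 8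
    have h10 : PySem.Int.mod (s : Int) 10 = ((s % 10 : Nat) : Int) := by
      exact_mod_cast PySem.Int.mod_natCast s 10
    have hs1 : ((s : Int) + 1) = ((s + 1 : Nat) : Int) := by push_cast; ring
    have e5 : (s % 5 + 1) % 5 = (s + 1) % 5 := by omega
    have e8 : (s % 8 + 1) % 8 = (s + 1) % 8 := by omega
    have e10 : (s % 10 + 1) % 10 = (s + 1) % 10 := by omega
    rw [PySem.List.enumerate_cons, List.foldl_cons]
    simp only [h5, h8, h10, PySem.List.pyGetD_natCast]
    rw [hs1, ih]
    simp only [cnt, List.length_cons, List.length_nil]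
    norm_num [e5, e8, e10]
    refine ⟨?_, ?_, ?_⟩ <;> split_ifs <;> ring

theorem bscore_eq (p : List Int) (hp : p ≠ []) (xs : List Int) :
    bScore p xs 0 p = cnt p xs 0 := by
  have h := lemB p hp xs 0 p 0 (List.length_pos_of_ne_nil hp) (by
    cases p with
    | nil => exact absurd rfl hp
    | cons b q => simp)
  simpa using h

-- ===== VERDICT (by name: the statement is the Claim_ definition above) =====
theorem solution_spec : Claim_equal_solution := by
  intro answers _
  simp only [Spec_solution, solution, solution_alt, List.map_cons, List.map_nil]
  have hb1 := bscore_eq [1,2,3,4,5] (by simp) answers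
  have hb2 := bscore_eq [2,1,2,3,2,4,2,5] (by simp) answers
  have hb3 := bscore_eq [3,3,1,1,2,2,4,4,5,5] (by simp) answers
  have hA := lemA answers 0 0 0 0
  simp only [Nat.cast_zero, Nat.zero_mod, zero_add] at hA
  rw [PySem.List.enumerate_eq_map_pyRange answers 0, List.foldl_map] at hA
  have hA' :
      List.foldl
        (fun (s : Int × Int × Int) i =>
          (if PySem.List.pyGetD answers i 0 = PySem.List.pyGetD [1, 2, 3, 4, 5] (PySem.Int.mod i 5) 0 then s.1 + 1 else s.1,
           if PySem.List.pyGetD answers i 0 = PySem.List.pyGetD [2, 1, 2, 3, 2, 4, 2, 5] (PySem.Int.mod i 8) 0 then s.2.1 + 1 else s.2.1,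
           if PySem.List.pyGetD answers i 0 = PySem.List.pyGetD [3, 3, 1, 1, 2, 2, 4, 4, 5, 5] (PySem.Int.mod i 10) 0 then s.2.2 + 1 else s.2.2))
        (0, 0, 0) (PySem.List.pyRange 0 (answers.length : Int) 1)
      = (cnt [1,2,3,4,5] answers 0, cnt [2,1,2,3,2,4,2,5] answers 0,
         cnt [3,3,1,1,2,2,4,4,5,5] answers 0) := hA
  rw [hA']
  simp only [hb1, hb2, hb3]
  rw [selLemma]
  simp
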